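-- pv_equiv track=rewrite | github.com/tongjimobiml/asynMARL | data_utilities/data_utils.py | trace_to_on_path_new
-- ===== SOURCE A (Python) =====
-- def trace_to_on_path_new(node, parents_map, on_path, graph):
-- 	current = node
-- 	node_to_ancester = True
-- 	while current not in on_path:
-- 		parent = parents_map[current][0]
-- 		if parent not in graph[current].keys():
-- 			node_to_ancester = False
-- 		current = parent
-- 	return current, node_to_ancester
-- ===== SOURCE B (Python) =====
-- def trace_to_on_path_new(node, parents_map, on_path, graph):
--     # Phase 1: follow the parent chain up to the first ancestor on the path,
--     # recording the off-path nodes traversed.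
--     chain = []
--     current = node
--     while current not in on_path:
--         chain.append(current)
--         current = parents_map[current][0]
--     # Phase 2: validate every traversed edge in a separate pass.
--     node_to_ancester = all(parents_map[n][0] in graph[n] for n in chain)
--     return current, node_to_ancester
-- ===== Notes on version B (the rewrite author's own statement) =====
-- stated objective: alternative
-- what changed: B decomposes A's single interleaved loop into two phases: first it collects the off-path parent chain while finding the ancestor, then it validates the edges with a separate all(...) pass over that chain.
import Mathlib
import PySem

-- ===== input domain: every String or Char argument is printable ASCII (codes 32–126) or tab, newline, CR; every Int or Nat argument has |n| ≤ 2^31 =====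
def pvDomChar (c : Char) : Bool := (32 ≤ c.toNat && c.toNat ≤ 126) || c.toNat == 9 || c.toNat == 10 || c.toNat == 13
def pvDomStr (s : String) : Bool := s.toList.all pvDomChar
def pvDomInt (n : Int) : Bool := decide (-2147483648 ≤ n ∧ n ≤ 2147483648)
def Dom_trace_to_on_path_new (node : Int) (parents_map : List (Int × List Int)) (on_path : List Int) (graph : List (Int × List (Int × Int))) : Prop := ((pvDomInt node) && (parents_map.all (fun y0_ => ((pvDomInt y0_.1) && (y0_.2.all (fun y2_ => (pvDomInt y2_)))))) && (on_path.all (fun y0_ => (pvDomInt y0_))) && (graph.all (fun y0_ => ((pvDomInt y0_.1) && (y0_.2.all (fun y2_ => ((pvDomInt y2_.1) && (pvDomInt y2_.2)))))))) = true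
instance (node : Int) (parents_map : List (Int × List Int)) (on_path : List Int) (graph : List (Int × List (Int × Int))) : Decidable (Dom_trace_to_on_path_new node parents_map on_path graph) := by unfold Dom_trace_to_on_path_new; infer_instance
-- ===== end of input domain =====

-- B separates A's interleaved walk into an ancestor-finding pass that records the chain and a
-- second edge-validation pass over that chain; equal return values are proved on Pre_ (no raise, loop terminates).

-- ===== PORT A =====
-- A's while loop, fuel-bounded: parents_map.length + 1 steps suffice whenever the Python loop
-- terminates (every looked-up node is a key of parents_map, so a longer run repeats a node and
-- the Python loop diverges).  Out of fuel / failed lookup returns the current state (junk,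
-- excluded by Pre_).
def pvLoopA (parents_map : List (Int × List Int)) (on_path : List Int) (graph : List (Int × List (Int × Int))) : Nat → Int → Bool → Int × Bool
  | 0, current, flag => (current, flag)
  | Nat.succ k, current, flag =>
    if on_path.contains current then (current, flag)
    else
      match (PySem.Dict.mk parents_map).get? current with
      | none => (current, flag)          -- KeyError in Python
      | some l =>
        match l.head? with
        | none => (current, flag)        -- IndexError in Python
        | some parent =>
          match (PySem.Dict.mk graph).get? current with
          | none => (current, flag)      -- KeyError in Python
          | some row =>
            pvLoopA parents_map on_path graph k parent
              (if ((PySem.Dict.mk row).get? parent).isSome then flag else false)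

def trace_to_on_path_new (node : Int) (parents_map : List (Int × List Int)) (on_path : List Int) (graph : List (Int × List (Int × Int))) : Int × Bool :=
  pvLoopA parents_map on_path graph (parents_map.length + 1) node true

-- ===== PORT B =====
-- Phase 1 of Source B: collect the off-path chain and the ancestor (same fuel bound as above).
def pvChainB (parents_map : List (Int × List Int)) (on_path : List Int) : Nat → Int → List Int × Int
  | 0, current => ([], current)
  | Nat.succ k, current =>
    if on_path.contains current then ([], current)
    else
      match (PySem.Dict.mk parents_map).get? current with
      | none => ([], current)            -- KeyError in Python
      | some l =>
        match l.head? with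
        | none => ([], current)          -- IndexError in Python
        | some parent =>
          let r := pvChainB parents_map on_path k parent
          (current :: r.1, r.2)

-- Phase 2 of Source B: 'parents_map[n][0] in graph[n]' for one chain node (lookups cannot fail inside Pre_).
def pvEdgeOk (parents_map : List (Int × List Int)) (graph : List (Int × List (Int × Int))) (n : Int) : Bool :=
  match (PySem.Dict.mk parents_map).get? n with
  | some (p :: _) =>
    (match (PySem.Dict.mk graph).get? n with
     | some row => ((PySem.Dict.mk row).get? p).isSome
     | none => false)
  | _ => false

def trace_to_on_path_new_alt (node : Int) (parents_map : List (Int × List Int)) (on_path : List Int) (graph : List (Int × List (Int × Int))) : Int × Bool :=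
  let r := pvChainB parents_map on_path (parents_map.length + 1) node
  (r.2, r.1.all (pvEdgeOk parents_map graph))

-- ===== PRECONDITION & SPEC =====
-- pvReach n c: following first parents from c, with every lookup defined, reaches a node of
-- on_path within n steps (so A's while loop terminates without raising).
def pvReach (parents_map : List (Int × List Int)) (on_path : List Int) (graph : List (Int × List (Int × Int))) : Nat → Int → Bool
  | 0, current => on_path.contains current
  | Nat.succ k, current =>
    if on_path.contains current then true
    else
      match (PySem.Dict.mk parents_map).get? current with
      | some (parent :: _) =>
        ((PySem.Dict.mk graph).get? current).isSome && pvReach parents_map on_path graph k parent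
      | _ => false

-- Pre_: A's loop hits on_path within |parents_map| steps with every parents_map/graph lookup
-- defined; otherwise the Python raises KeyError/IndexError or loops forever.
def Pre_trace_to_on_path_new (node : Int) (parents_map : List (Int × List Int)) (on_path : List Int) (graph : List (Int × List (Int × Int))) : Prop :=
  pvReach parents_map on_path graph (parents_map.length + 1) node = true
instance (node : Int) (parents_map : List (Int × List Int)) (on_path : List Int) (graph : List (Int × List (Int × Int))) : Decidable (Pre_trace_to_on_path_new node parents_map on_path graph) := by unfold Pre_trace_to_on_path_new; infer_instance

def pvWitness_trace_to_on_path_new : Int × (List (Int × List Int)) × List Int × (List (Int × List (Int × Int))) :=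
  (3, [(3, [2]), (2, [1])], [1], [(3, [(2, 7)]), (2, [])])

def Spec_trace_to_on_path_new (node : Int) (parents_map : List (Int × List Int)) (on_path : List Int) (graph : List (Int × List (Int × Int))) (out : Int × Bool) : Prop := out = trace_to_on_path_new_alt node parents_map on_path graph
instance (node : Int) (parents_map : List (Int × List Int)) (on_path : List Int) (graph : List (Int × List (Int × Int))) (out : Int × Bool) : Decidable (Spec_trace_to_on_path_new node parents_map on_path graph out) := by unfold Spec_trace_to_on_path_new; infer_instance

-- ===== CLAIM (what is proved, stated in full; the proofs are below) =====
def Claim_equal_trace_to_on_path_new : Prop := ∀ (node : Int) (parents_map : List (Int × List Int)) (on_path : List Int) (graph : List (Int × List (Int × Int))), Dom_trace_to_on_path_new node parents_map on_path graph → Pre_trace_to_on_path_new node parents_map on_path graph → Spec_trace_to_on_path_new node parents_map on_path graph (trace_to_on_path_new node parents_map on_path graph)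

-- ===== LEMMAS AND PROOFS =====

theorem pvWitness_ok : Dom_trace_to_on_path_new (pvWitness_trace_to_on_path_new.1) (pvWitness_trace_to_on_path_new.2.1) (pvWitness_trace_to_on_path_new.2.2.1) (pvWitness_trace_to_on_path_new.2.2.2) ∧ Pre_trace_to_on_path_new (pvWitness_trace_to_on_path_new.1) (pvWitness_trace_to_on_path_new.2.1) (pvWitness_trace_to_on_path_new.2.2.1) (pvWitness_trace_to_on_path_new.2.2.2) := by decide

-- Loop invariant: where the reach certificate holds with fuel n, A's fuel-n loop from (c, f)
-- returns B's ancestor paired with f && (edge validity of B's chain).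
theorem pvLoopA_eq (parents_map : List (Int × List Int)) (on_path : List Int) (graph : List (Int × List (Int × Int))) :
    ∀ (n : Nat) (c : Int) (f : Bool), pvReach parents_map on_path graph n c = true →
      pvLoopA parents_map on_path graph n c f =
        ((pvChainB parents_map on_path n c).2,
         f && (pvChainB parents_map on_path n c).1.all (pvEdgeOk parents_map graph)) := by
  intro n
  induction n with
  | zero =>
    intro c f h
    simp [pvLoopA, pvChainB]
  | succ k ih =>
    intro c f h
    simp only [pvReach] at h
    by_cases hc : c ∈ on_path
    · simp [pvLoopA, pvChainB, hc]
    · have hcb : on_path.contains c = false := by simpa using hc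
      rw [hcb] at h
      simp only [Bool.false_eq_true, if_false] at h
      match hpm : (PySem.Dict.mk parents_map).get? c with
      | none => rw [hpm] at h; exact absurd h (by simp)
      | some [] => rw [hpm] at h; exact absurd h (by simp)
      | some (p :: rest) =>
        rw [hpm] at h
        match hgr : (PySem.Dict.mk graph).get? c with
        | none => rw [hgr] at h; exact absurd h (by simp)
        | some row =>
          rw [hgr] at h
          simp only [Option.isSome_some, Bool.true_and] at h
          have hedge : pvEdgeOk parents_map graph c = ((PySem.Dict.mk row).get? p).isSome := by
            simp [pvEdgeOk, hpm, hgr]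
          simp only [pvLoopA, pvChainB, hpm, hgr, List.head?, ih p _ h]
          cases hmem : ((PySem.Dict.mk row).get? p).isSome <;>
            cases f <;> simp [hmem, hc, hedge]

-- ===== VERDICT (by name: the statement is the Claim_ definition above) =====
theorem trace_to_on_path_new_spec : Claim_equal_trace_to_on_path_new := by
  intro node parents_map on_path graph _ hpre
  unfold Spec_trace_to_on_path_new trace_to_on_path_new trace_to_on_path_new_alt
  rw [pvLoopA_eq parents_map on_path graph _ node true hpre]
  simp
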